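-- pv_equiv track=rewrite | github.com/vinchinzu/euler | python/046.py | is_goldbach
-- ===== SOURCE A (Python) =====
-- from math import isqrt
--
-- def is_prime(n: int) -> bool:
--     if n < 2:
--         return False
--     if n == 2:
--         return True
--     if n % 2 == 0:
--         return False
--     i = 3
--     while i * i <= n:
--         if n % i == 0:
--             return False
--         i += 2
--     return True
--
-- def is_goldbach(n: int) -> bool:
--     """Check if n = prime + 2 * square."""
--     for prime in range(3, n, 2):
--         if not is_prime(prime):
--             continue
--         remaining = n - prime
--         if remaining % 2 != 0:
--             continue
--         square = remaining // 2
--         if isqrt(square) ** 2 == square: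
--             return True
--     return False
-- ===== SOURCE B (Python) =====
-- from math import isqrt
--
-- def is_prime(n: int) -> bool:
--     if n < 2:
--         return False
--     if n == 2:
--         return True
--     if n % 2 == 0:
--         return False
--     i = 3
--     while i * i <= n:
--         if n % i == 0:
--             return False
--         i += 2
--     return True
--
-- def is_goldbach(n: int) -> bool:
--     """Check if n = odd prime + 2 * square, iterating over the O(sqrt(n)) squares instead of the primes."""
--     if n % 2 == 0:
--         return False
--     for k in range(1, isqrt(max(n - 3, 0) // 2) + 1):
--         if is_prime(n - 2 * k * k):
--             return True
--     return False
-- ===== Notes on version B (the rewrite author's own statement) =====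
-- stated objective: faster
-- what changed: Instead of scanning every odd number below n and primality-testing each (A), B iterates over the O(sqrt(n)) candidate squares k and primality-tests n-2k^2, after rejecting even n outright.
import Mathlib
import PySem

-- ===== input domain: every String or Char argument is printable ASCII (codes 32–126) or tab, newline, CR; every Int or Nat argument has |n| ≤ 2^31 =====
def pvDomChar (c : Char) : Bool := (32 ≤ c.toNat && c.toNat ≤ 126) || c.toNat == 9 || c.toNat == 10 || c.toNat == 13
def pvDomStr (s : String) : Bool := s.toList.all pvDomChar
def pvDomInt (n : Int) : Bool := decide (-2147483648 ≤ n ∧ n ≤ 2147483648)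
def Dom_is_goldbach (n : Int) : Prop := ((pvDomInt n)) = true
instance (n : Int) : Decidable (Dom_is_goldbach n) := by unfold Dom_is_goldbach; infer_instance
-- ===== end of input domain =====

-- B iterates over the O(√n) candidate squares and tests n−2k² for primality, instead of A's
-- scan over all odd numbers below n; same return value everywhere (objective: faster).

-- ===== PORT A =====
-- shared helper: the module's is_prime (identical in Source A and Source B); trial division by odd i
def pvPrimeLoop (n : Int) (i : Int) : Bool :=
  if _h : i * i ≤ n then
    if PySem.Int.mod n i == 0 then false else pvPrimeLoop n (i + 2)
  else true
termination_by (n + 2 - i).toNat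
decreasing_by
  have hin : i ≤ n := by
    by_cases h0 : i ≤ 0
    · nlinarith
    · nlinarith
  omega

def is_prime (n : Int) : Bool :=
  if n < 2 then false
  else if n == 2 then true
  else if PySem.Int.mod n 2 == 0 then false
  else pvPrimeLoop n 3

-- math.isqrt: exact for 0 ≤ x (both programs only call it on nonnegative arguments)
def pyIsqrt (x : Int) : Int := (Nat.sqrt x.toNat : Int)

def is_goldbach (n : Int) : Bool :=
  (PySem.List.pyRange 3 n 2).any (fun prime =>
    if !(is_prime prime) then false
    else
      let remaining := n - prime
      if PySem.Int.mod remaining 2 != 0 then false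
      else
        let square := PySem.Int.floordiv remaining 2
        pyIsqrt square ^ 2 == square)

-- ===== PORT B =====
def is_goldbach_alt (n : Int) : Bool :=
  if PySem.Int.mod n 2 == 0 then false
  else
    (PySem.List.pyRange 1 (pyIsqrt (PySem.Int.floordiv (max (n - 3) 0) 2) + 1) 1).any
      (fun k => is_prime (n - 2 * k * k))

-- ===== PRECONDITION & SPEC =====
def Spec_is_goldbach (n : Int) (out : Bool) : Prop := out = is_goldbach_alt n
instance (n : Int) (out : Bool) : Decidable (Spec_is_goldbach n out) := by unfold Spec_is_goldbach; infer_instance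

-- ===== CLAIM (what is proved, stated in full; the proofs are below) =====
def Claim_equal_is_goldbach : Prop := ∀ (n : Int), Dom_is_goldbach n → Spec_is_goldbach n (is_goldbach n)

-- ===== LEMMAS AND PROOFS =====

theorem pv_main (n : Int) : is_goldbach n = is_goldbach_alt n := by
  unfold is_goldbach is_goldbach_alt
  by_cases h2 : (2:Int) ∣ n
  · -- n even: B's guard fires; A's scan never finds an even remainder (every p in the range is odd)
    have hmod : PySem.Int.mod n 2 = 0 := (PySem.Int.mod_eq_zero_iff_dvd n 2).mpr h2
    simp only [hmod, BEq.rfl, if_true]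
    rw [List.any_eq_false]
    intro p hp
    obtain ⟨hp3, hpn, hpd⟩ := (PySem.List.mem_pyRange_iff_of_pos (by norm_num) p).mp hp
    have hodd : PySem.Int.mod (n - p) 2 ≠ 0 := by
      intro hc
      have := (PySem.Int.mod_eq_zero_iff_dvd (n - p) 2).mp hc
      omega
    have hb : (PySem.Int.mod (n - p) 2 != 0) = true := by
      simpa using hodd
    simp only [hb, if_true]
    split <;> simp
  · have hmodn : PySem.Int.mod n 2 ≠ 0 := by
      intro hc; exact h2 ((PySem.Int.mod_eq_zero_iff_dvd n 2).mp hc)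
    have hbeq : (PySem.Int.mod n 2 == 0) = false := by simpa using hmodn
    rw [hbeq, if_neg (by simp)]
    rw [Bool.eq_iff_iff]
    simp only [List.any_eq_true]
    constructor
    · rintro ⟨p, hp, hpred⟩
      obtain ⟨hp3, hpn, hpd⟩ := (PySem.List.mem_pyRange_iff_of_pos (by norm_num) p).mp hp
      by_cases hpr : is_prime p = true
      swap
      · simp [hpr] at hpred
      simp only [hpr, Bool.not_true, Bool.false_eq_true, if_false] at hpred
      have hn1 : n % 2 = 1 := by
        rcases Int.emod_two_eq n with h | h
        · exact absurd (Int.dvd_of_emod_eq_zero h) h2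
        · exact h
      have hm0 : PySem.Int.mod (n - p) 2 = 0 :=
        (PySem.Int.mod_eq_zero_iff_dvd (n - p) 2).mpr (by omega)
      have hb : (PySem.Int.mod (n - p) 2 != 0) = false := by
        rw [bne_eq_false_iff_eq]; exact hm0
      simp only [hb, Bool.false_eq_true, if_false, beq_iff_eq] at hpred
      -- hpred : pyIsqrt (floordiv (n - p) 2) ^ 2 = floordiv (n - p) 2
      have h2s : 2 * PySem.Int.floordiv (n - p) 2 = n - p := by
        have := PySem.Int.floordiv_mul_add_mod (n - p) 2
        rw [hm0] at this; omega
      set s := PySem.Int.floordiv (n - p) 2 with hs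
      set kn := Nat.sqrt s.toNat with hkn
      have hkval : pyIsqrt s = (kn : Int) := rfl
      rw [hkval] at hpred
      have hkk : (kn : Int) * kn = s := by rw [← hpred]; ring
      have hs1 : 1 ≤ s := by omega
      have hkn1 : 1 ≤ kn := by
        by_contra h
        have h0 : kn = 0 := by omega
        rw [h0] at hkk; simp at hkk; omega
      have hn5 : 5 ≤ n := by omega
      have hmax : max (n - 3) 0 = n - 3 := by omega
      have hkfd : (kn : Int) * kn ≤ PySem.Int.floordiv (n - 3) 2 :=
        (PySem.Int.le_floordiv_iff_mul_le (by norm_num)).mpr (by omega)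
      have hfd0 : (0:Int) ≤ PySem.Int.floordiv (n - 3) 2 :=
        (PySem.Int.le_floordiv_iff_mul_le (by norm_num)).mpr (by omega)
      have hknn : kn * kn ≤ (PySem.Int.floordiv (n - 3) 2).toNat := by
        have hcast : ((kn * kn : Nat) : Int) = (kn : Int) * kn := by push_cast; ring
        omega
      have hle : kn ≤ Nat.sqrt (PySem.Int.floordiv (n - 3) 2).toNat := Nat.le_sqrt.mpr hknn
      refine ⟨(kn : Int), ?_, ?_⟩
      · rw [PySem.List.mem_pyRange_one, hmax]
        have hKv : pyIsqrt (PySem.Int.floordiv (n - 3) 2)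
            = (Nat.sqrt (PySem.Int.floordiv (n - 3) 2).toNat : Int) := rfl
        rw [hKv]
        omega
      · rw [mul_assoc, hkk]
        have hp' : n - 2 * s = p := by omega
        rw [hp', hpr]
    · rintro ⟨k, hk, hpk⟩
      rw [PySem.List.mem_pyRange_one] at hk
      obtain ⟨hk1, hkK⟩ := hk
      have hKv : pyIsqrt (PySem.Int.floordiv (max (n - 3) 0) 2)
          = (Nat.sqrt (PySem.Int.floordiv (max (n - 3) 0) 2).toNat : Int) := rfl
      rw [hKv] at hkK
      set kn := k.toNat with hknd
      have hkcast : (kn : Int) = k := by omega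
      have hfd0 : (0:Int) ≤ PySem.Int.floordiv (max (n - 3) 0) 2 :=
        (PySem.Int.le_floordiv_iff_mul_le (by norm_num)).mpr (by omega)
      have hknsqrt : kn ≤ Nat.sqrt (PySem.Int.floordiv (max (n - 3) 0) 2).toNat := by omega
      have hknn : kn * kn ≤ (PySem.Int.floordiv (max (n - 3) 0) 2).toNat := Nat.le_sqrt.mp hknsqrt
      have hkkfd : k * k ≤ PySem.Int.floordiv (max (n - 3) 0) 2 := by
        have hcast : ((kn * kn : Nat) : Int) = k * k := by push_cast; rw [hkcast]
        omega
      have h2k2 : (k * k) * 2 ≤ max (n - 3) 0 :=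
        (PySem.Int.le_floordiv_iff_mul_le (by norm_num)).mp hkkfd
      have hkk1 : 1 ≤ k * k := by nlinarith
      have hb : (k * k) * 2 ≤ n - 3 := by omega
      have hassoc : 2 * k * k = 2 * (k * k) := by ring
      have hn1 : n % 2 = 1 := by
        rcases Int.emod_two_eq n with h | h
        · exact absurd (Int.dvd_of_emod_eq_zero h) h2
        · exact h
      refine ⟨n - 2 * k * k, ?_, ?_⟩
      · rw [PySem.List.mem_pyRange_iff_of_pos (by norm_num)]
        refine ⟨by omega, by omega, ?_⟩
        omega
      · simp only [hpk, Bool.not_true, Bool.false_eq_true, if_false]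
        have hnp : n - (n - 2 * k * k) = 2 * (k * k) := by ring
        have hm0 : PySem.Int.mod (n - (n - 2 * k * k)) 2 = 0 := by
          rw [PySem.Int.mod_eq_zero_iff_dvd, hnp]
          exact ⟨k * k, rfl⟩
        have hbne : (PySem.Int.mod (n - (n - 2 * k * k)) 2 != 0) = false := by
          rw [bne_eq_false_iff_eq]; exact hm0
        simp only [hbne, Bool.false_eq_true, if_false, beq_iff_eq]
        have hfdiv : PySem.Int.floordiv (n - (n - 2 * k * k)) 2 = k * k := by
          rw [PySem.Int.floordiv_eq_iff_of_pos (by norm_num)]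
          constructor <;> nlinarith
        rw [hfdiv]
        have htn : (k * k).toNat = kn * kn := by
          have hcast : ((kn * kn : Nat) : Int) = k * k := by push_cast; rw [hkcast]
          omega
        have hiq : pyIsqrt (k * k) = k := by
          unfold pyIsqrt
          rw [htn]
          have hsq : Nat.sqrt (kn * kn) = kn := by
            have h := Nat.sqrt_eq' kn
            rwa [pow_two] at h
          rw [hsq, hkcast]
        rw [hiq, pow_two]

-- ===== VERDICT (by name: the statement is the Claim_ definition above) =====
theorem is_goldbach_spec : Claim_equal_is_goldbach := by
  intro n _
  unfold Spec_is_goldbach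
  exact pv_main n
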